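-- pv_equiv track=rewrite | github.com/kpgbrock/CS89_VariantEffectPrediction | Code/vep_functions.py | seq_with_window
-- ===== SOURCE A (Python) =====
-- default_window_size = 12
--
-- def seq_with_window(seq,pos,window_size=default_window_size):
--
--   # Get our sequence length and our proposed window start and window end. Note
--   # that for sequence length, we're going ahead and subtracting one to make our
--   # indexing later easier.
--   seqlength = len(seq)-1
--   n_left = pos-window_size
--   n_right = pos+window_size
--
--   # Grab what we can of the left side of the subsequence (before our input
--   # position)
--   left_seq = seq[max(n_left,0):pos]
--
--   # If this goes beyond the start of the original sequence, fill with gaps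
--   if n_left < 0:
--     left_seq = ''.join(['-' for i in range(abs(n_left))]) + left_seq
--
--   # Now let's do the same for the right side - only this time, we care about not
--   # exceeding the last amino acid in the sequence
--   right_seq = seq[pos+1:min(seqlength,n_right)+1]
--   if n_right > seqlength:
--     right_seq = right_seq + ''.join(['-' for i in range(abs(n_right-seqlength))])
--
--   # Return our combined subsequence
--   return left_seq + seq[pos] + right_seq
-- ===== SOURCE B (Python) =====
-- default_window_size = 12
--
-- def seq_with_window(seq, pos, window_size=default_window_size):
--   # Single left-to-right index scan on each side of pos; '-' pads out-of-range indices.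
--   n = len(seq)
--   left = ''.join(seq[i] if 0 <= i < n else '-' for i in range(pos - window_size, pos))
--   right = ''.join(seq[i] if 0 <= i < n else '-' for i in range(pos + 1, pos + window_size + 1))
--   return left + seq[pos] + right
-- ===== Notes on version B (the rewrite author's own statement) =====
-- stated objective: simpler
-- what changed: Replaces A's clamped slices plus conditional gap-fill concatenations by a direct index scan: each side of pos is built in one pass over its index range, emitting seq[i] when in range and '-' otherwise.
-- outside the precondition, e.g. on seq_with_window('ABCDE', -1, 2): A returns '---ABCDEAB', B returns '--EAB'; on seq_with_window('ABCDE', 0, -3): A returns 'ABC', B returns 'A'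
import Mathlib
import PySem

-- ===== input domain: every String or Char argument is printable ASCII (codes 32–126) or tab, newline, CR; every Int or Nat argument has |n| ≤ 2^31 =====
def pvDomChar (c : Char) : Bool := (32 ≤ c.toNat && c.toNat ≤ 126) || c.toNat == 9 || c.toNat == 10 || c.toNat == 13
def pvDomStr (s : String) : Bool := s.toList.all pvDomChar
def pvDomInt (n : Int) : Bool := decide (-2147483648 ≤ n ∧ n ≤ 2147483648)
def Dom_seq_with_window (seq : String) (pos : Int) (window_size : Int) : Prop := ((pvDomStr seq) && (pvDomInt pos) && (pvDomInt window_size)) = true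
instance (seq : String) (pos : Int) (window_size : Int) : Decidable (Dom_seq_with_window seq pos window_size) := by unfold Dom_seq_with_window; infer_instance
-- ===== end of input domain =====

-- B builds the window in one left-to-right pass over the index range instead of A's three
-- slice-and-pad segments (objective: simpler).

-- ===== PORT A =====
-- literal port of A: clamped left slice + left gap fill, center seq[pos], clamped right slice + right gap fill
def seq_with_window (seq : String) (pos : Int) (window_size : Int) : String :=
  let L := seq.toList
  let seqlength : Int := (L.length : Int) - 1
  let n_left : Int := pos - window_size
  let n_right : Int := pos + window_size
  let left_seq := PySem.List.slice L (some (max n_left 0)) (some pos)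
  let left_seq := if n_left < 0 then
      ((PySem.List.pyRange 0 (n_left.natAbs : Int) 1).map (fun _ => '-')) ++ left_seq
    else left_seq
  let right_seq := PySem.List.slice L (some (pos + 1)) (some (min seqlength n_right + 1))
  let right_seq := if n_right > seqlength then
      right_seq ++ ((PySem.List.pyRange 0 ((n_right - seqlength).natAbs : Int) 1).map (fun _ => '-'))
    else right_seq
  -- seq[pos]: IndexError (pyGet? = none) is excluded by Pre_; the default char is unreachable there
  String.mk (left_seq ++ [(PySem.List.pyGet? L pos).getD ' '] ++ right_seq)

-- ===== PORT B =====
-- literal port of B: an index scan over each side's range, seq[i] when in range, '-' otherwise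
def seq_with_window_alt (seq : String) (pos : Int) (window_size : Int) : String :=
  let L := seq.toList
  let n : Int := (L.length : Int)
  let left := (PySem.List.pyRange (pos - window_size) pos 1).map
    (fun i => if 0 ≤ i ∧ i < n then (PySem.List.pyGet? L i).getD '-' else '-')
  let right := (PySem.List.pyRange (pos + 1) (pos + window_size + 1) 1).map
    (fun i => if 0 ≤ i ∧ i < n then (PySem.List.pyGet? L i).getD '-' else '-')
  -- seq[pos]: IndexError (pyGet? = none) is excluded by Pre_; the default char is unreachable there
  String.mk (left ++ [(PySem.List.pyGet? L pos).getD ' '] ++ right)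

-- ===== PRECONDITION & SPEC =====
-- Pre_ restricts to 0 ≤ pos < len(seq) (outside it A either raises IndexError or returns
-- negative-index-wraparound values that are accidents of Python slicing) and to windows with
-- pos + window_size + 1 ≥ 0 (below that, A's right-slice stop index goes negative and
-- Python's from-the-end wraparound yields accidental extra characters).
def Pre_seq_with_window (seq : String) (pos : Int) (window_size : Int) : Prop :=
  0 ≤ pos ∧ pos < (seq.toList.length : Int) ∧ 0 ≤ pos + window_size + 1
instance (seq : String) (pos : Int) (window_size : Int) : Decidable (Pre_seq_with_window seq pos window_size) := by unfold Pre_seq_with_window; infer_instance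

def pvWitness_seq_with_window : String × Int × Int := ("ABCDE", 2, 3)

def Spec_seq_with_window (seq : String) (pos : Int) (window_size : Int) (out : String) : Prop := out = seq_with_window_alt seq pos window_size
instance (seq : String) (pos : Int) (window_size : Int) (out : String) : Decidable (Spec_seq_with_window seq pos window_size out) := by unfold Spec_seq_with_window; infer_instance

-- ===== CLAIM (what is proved, stated in full; the proofs are below) =====
def Claim_equal_seq_with_window : Prop := ∀ (seq : String) (pos : Int) (window_size : Int), Dom_seq_with_window seq pos window_size → Pre_seq_with_window seq pos window_size → Spec_seq_with_window seq pos window_size (seq_with_window seq pos window_size)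

-- ===== LEMMAS AND PROOFS =====

-- a run of in-range indices maps, via B's lookup, to the corresponding drop/take segment
lemma map_pyGetD_window {α : Type} (L : List α) (d : α) :
    ∀ (k : Nat) (a : Int), 0 ≤ a → a + k ≤ (L.length : Int) →
    (PySem.List.pyRange a (a + k) 1).map (fun i => (PySem.List.pyGet? L i).getD d)
      = (L.drop a.toNat).take k := by
  intro k
  induction k with
  | zero =>
      intro a _ _
      simp [PySem.List.pyRange_one_eq_nil]
  | succ m ih =>
      intro a ha hle
      have hlt : a < (L.length : Int) := by omega
      have hcons : PySem.List.pyRange a (a + (m + 1 : Nat)) 1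
          = a :: PySem.List.pyRange (a + 1) (a + (m + 1 : Nat)) 1 :=
        PySem.List.pyRange_one_cons (by push_cast; omega)
      have hshift : (a : Int) + ((m + 1 : Nat) : Int) = (a + 1) + (m : Nat) := by omega
      have hle' : a + (m : Int) + 1 ≤ (L.length : Int) := by push_cast at hle; omega
      have hrec := ih (a + 1) (by omega) (by omega)
      have hget : PySem.List.pyGet? L a = some (L[a.toNat]'(by omega)) :=
        PySem.List.pyGet?_eq_some_getElem L ha hlt
      have hdrop : L.drop a.toNat = L[a.toNat]'(by omega) :: L.drop (a.toNat + 1) :=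
        List.drop_eq_getElem_cons (by omega)
      rw [hcons]
      simp only [List.map_cons, hget, Option.getD_some]
      rw [hshift, hrec, hdrop]
      simp only [List.take_succ_cons, List.cons.injEq, true_and]
      rw [show ((a : Int) + 1).toNat = a.toNat + 1 from by omega]

-- the same, stated on the two endpoints
lemma map_pyGetD_window' {α : Type} (L : List α) (d : α) (a b : Int)
    (ha : 0 ≤ a) (hab : a ≤ b) (hb : b ≤ (L.length : Int)) :
    (PySem.List.pyRange a b 1).map (fun i => (PySem.List.pyGet? L i).getD d)
      = (L.drop a.toNat).take (b - a).toNat := by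
  have h := map_pyGetD_window L d (b - a).toNat a ha (by omega)
  rwa [show a + ((b - a).toNat : Int) = b by omega] at h

-- a Python slice with nonnegative bounds is drop/take
lemma slice_nonneg {α : Type} (L : List α) (a b : Int) (ha : 0 ≤ a) (hb : 0 ≤ b) :
    PySem.List.slice L (some a) (some b) = (L.drop a.toNat).take (b - a).toNat := by
  have h := PySem.List.slice_natCast L a.toNat b.toNat
  rw [show ((a.toNat : Int)) = a by omega, show ((b.toNat : Int)) = b by omega] at h
  rw [h]
  by_cases hle : a ≤ b
  · congr 1; omega
  · rw [show b.toNat - a.toNat = 0 by omega, show (b - a).toNat = 0 by omega]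

-- a map whose values are all the gap character is a replicate
lemma map_const_pyRange (a b : Int) (f : Int → Char)
    (hf : ∀ i, a ≤ i → i < b → f i = '-') (k : Nat) (hk : (b - a).toNat = k) :
    (PySem.List.pyRange a b 1).map f = List.replicate k '-' := by
  rw [List.eq_replicate_iff]
  refine ⟨by simp [PySem.List.length_pyRange_one, hk], ?_⟩
  intro x hx
  rcases List.mem_map.1 hx with ⟨i, hi, h⟩
  have := PySem.List.mem_pyRange_one.1 hi
  rw [← h]; exact hf i this.1 this.2

theorem seq_with_window_spec : Claim_equal_seq_with_window := by
  intro seq pos w _ hpre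
  obtain ⟨hpos, hlt, hw⟩ := hpre
  unfold Spec_seq_with_window seq_with_window seq_with_window_alt
  simp only []
  set L := seq.toList with hL
  set n : Int := (L.length : Int) with hn
  congr 1
  set f : Int → Char := fun i => if 0 ≤ i ∧ i < n then (PySem.List.pyGet? L i).getD '-' else '-' with hf
  have hfin : ∀ i, 0 ≤ i → i < n → f i = (PySem.List.pyGet? L i).getD '-' := by
    intro i h1 h2; rw [hf]; exact if_pos ⟨h1, h2⟩
  have hfout : ∀ i, i < 0 ∨ n ≤ i → f i = '-' := by
    intro i h; rw [hf]; exact if_neg (by omega)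
  -- in-range runs of B's pass are drop/take segments
  have hin : ∀ a b : Int, 0 ≤ a → b ≤ n →
      (PySem.List.pyRange a b 1).map f = (L.drop a.toNat).take (b - a).toNat := by
    intro a b ha hb
    by_cases hab : a ≤ b
    · rw [List.map_congr_left (fun i hi => by
        have hm := PySem.List.mem_pyRange_one.1 hi
        exact hfin i (by omega) (by omega))]
      exact map_pyGetD_window' L '-' a b ha hab (by omega)
    · rw [PySem.List.pyRange_one_eq_nil (by omega),
          show (b - a).toNat = 0 from by omega]
      simp
  -- out-of-range runs of B's pass are gap runs
  have hout : ∀ a b : Int, (∀ i, a ≤ i → i < b → i < 0 ∨ n ≤ i) →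
      (PySem.List.pyRange a b 1).map f = List.replicate (b - a).toNat '-' :=
    fun a b h => map_const_pyRange a b f (fun i h1 h2 => hfout i (h i h1 h2)) _ rfl
  -- left segment
  have hleft : (PySem.List.pyRange (pos - w) pos 1).map f
      = (if pos - w < 0 then
          ((PySem.List.pyRange 0 ((pos - w).natAbs : Int) 1).map (fun _ => '-'))
            ++ PySem.List.slice L (some (max (pos - w) 0)) (some pos)
        else PySem.List.slice L (some (max (pos - w) 0)) (some pos)) := by
    by_cases hneg : pos - w < 0
    · rw [if_pos hneg]
      rw [PySem.List.pyRange_one_append (pos - w) 0 pos (by omega) hpos]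
      rw [List.map_append]
      rw [hout (pos - w) 0 (fun i h1 h2 => Or.inl h2)]
      rw [hin 0 pos le_rfl (le_of_lt hlt)]
      rw [map_const_pyRange 0 ((pos - w).natAbs : Int) (fun _ => '-')
            (fun _ _ _ => rfl) (0 - (pos - w)).toNat (by omega)]
      rw [slice_nonneg L (max (pos - w) 0) pos (by omega) hpos]
      rw [show max (pos - w) 0 = 0 from by omega]
    · rw [if_neg hneg]
      rw [slice_nonneg L (max (pos - w) 0) pos (by omega) hpos]
      rw [show max (pos - w) 0 = pos - w from by omega]
      exact hin (pos - w) pos (by omega) (le_of_lt hlt)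
  rw [hleft]
  -- right segment
  have hright : (PySem.List.pyRange (pos + 1) (pos + w + 1) 1).map f
      = (if pos + w > n - 1 then
          PySem.List.slice L (some (pos + 1)) (some (min (n - 1) (pos + w) + 1))
            ++ ((PySem.List.pyRange 0 ((pos + w - (n - 1)).natAbs : Int) 1).map (fun _ => '-'))
        else PySem.List.slice L (some (pos + 1)) (some (min (n - 1) (pos + w) + 1))) := by
    have hs : PySem.List.slice L (some (pos + 1)) (some (min (n - 1) (pos + w) + 1))
        = (L.drop (pos + 1).toNat).take (min n (pos + w + 1) - (pos + 1)).toNat := by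
      rw [slice_nonneg L (pos + 1) (min (n - 1) (pos + w) + 1) (by omega) (by omega)]
      rw [show min (n - 1) (pos + w) + 1 = min n (pos + w + 1) from by omega]
    by_cases hover : pos + w > n - 1
    · rw [if_pos hover]
      rw [PySem.List.pyRange_one_append (pos + 1) (min n (pos + w + 1)) (pos + w + 1)
            (by omega) (by omega)]
      rw [List.map_append]
      rw [hin (pos + 1) (min n (pos + w + 1)) (by omega) (by omega)]
      rw [hout (min n (pos + w + 1)) (pos + w + 1) (fun i h1 h2 => Or.inr (by omega))]
      rw [map_const_pyRange 0 ((pos + w - (n - 1)).natAbs : Int) (fun _ => '-')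
            (fun _ _ _ => rfl) (pos + w + 1 - min n (pos + w + 1)).toNat (by omega)]
      rw [hs]
    · rw [if_neg hover]
      rw [hs]
      rw [hin (pos + 1) (pos + w + 1) (by omega) (by omega)]
      rw [show min n (pos + w + 1) = pos + w + 1 from by omega]
  rw [hright]

-- ===== VERDICT: the theorem above is the verdict; its statement is Claim_equal_seq_with_window =====
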